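-- pv_equiv track=rewrite | github.com/cirosantilli/project-euler-solvers | solvers/442.py | count_eleven_free_upto
-- ===== SOURCE A (Python) =====
-- from functools import lru_cache
--
-- def count_eleven_free_upto(x: int, trans, bad) -> int:
--     """
--     Count eleven-free positive integers in [1, x], using digit-DP over the automaton.
--     """
--     if x <= 0:
--         return 0
--
--     digits = list(map(int, str(x)))
--     D = len(digits)
--
--     @lru_cache(None)
--     def dp(pos: int, state: int, started: bool, tight: bool) -> int:
--         if pos == D:
--             return 1 if started else 0  # exclude 0
--
--         limit = digits[pos] if tight else 9
--         total = 0
--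
--         for dig in range(limit + 1):
--             ntight = tight and (dig == limit)
--
--             if not started and dig == 0:
--                 # Still skipping leading zeros; automaton not advanced.
--                 total += dp(pos + 1, 0, False, ntight)
--             else:
--                 nstate = trans[state if started else 0][dig]
--                 if not bad[nstate]:
--                     total += dp(pos + 1, nstate, True, ntight)
--
--         return total
--
--     return dp(0, 0, False, True)
-- ===== SOURCE B (Python) =====
-- def count_eleven_free_upto(x: int, trans, bad) -> int:
--     """
--     Count eleven-free positive integers in [1, x]: iterative bottom-up tables
--     plus a single left-to-right walk along the digits of x (no recursion).
--     """
--     if x <= 0: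
--         return 0
--
--     digits = [int(c) for c in str(x)]
--     D = len(digits)
--     S = len(trans)
--
--     # free[k][s]: ways to append k more digits 0-9 from state s, never hitting a bad state.
--     # short[k]: eleven-free integers with at most k digits (i.e. in [1, 10^k - 1]).
--     row = [1] * S
--     free = [row]
--     short = [0]
--     s_acc = 0
--     for _ in range(D - 1):
--         s_acc += sum(row[trans[0][d]] for d in range(1, 10) if not bad[trans[0][d]])
--         short.append(s_acc)
--         row = [sum(row[trans[s][d]] for d in range(10) if not bad[trans[s][d]])
--                for s in range(S)]
--         free.append(row)
--
--     total = 0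
--     state = 0
--     started = False
--     for pos, dig in enumerate(digits):
--         rem = D - 1 - pos
--         for d in range(dig):
--             if not started and d == 0:
--                 total += short[rem]
--             else:
--                 ns = trans[state if started else 0][d]
--                 if not bad[ns]:
--                     total += free[rem][ns]
--         if not started and dig == 0:
--             continue
--         ns = trans[state if started else 0][dig]
--         if bad[ns]:
--             return total
--         state = ns
--         started = True
--     return total + 1
-- ===== Notes on version B (the rewrite author's own statement) =====
-- stated objective: alternative
-- what changed: A's lru_cache'd top-down recursion dp(pos,state,started,tight) is replaced by bottom-up iteration: a backward-built table free[k][state] of unbounded k-digit continuations plus a shorter-numbers table short[k], then one left-to-right walk along the digits of x that adds table entries for every digit below the current one; …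
import Mathlib
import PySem

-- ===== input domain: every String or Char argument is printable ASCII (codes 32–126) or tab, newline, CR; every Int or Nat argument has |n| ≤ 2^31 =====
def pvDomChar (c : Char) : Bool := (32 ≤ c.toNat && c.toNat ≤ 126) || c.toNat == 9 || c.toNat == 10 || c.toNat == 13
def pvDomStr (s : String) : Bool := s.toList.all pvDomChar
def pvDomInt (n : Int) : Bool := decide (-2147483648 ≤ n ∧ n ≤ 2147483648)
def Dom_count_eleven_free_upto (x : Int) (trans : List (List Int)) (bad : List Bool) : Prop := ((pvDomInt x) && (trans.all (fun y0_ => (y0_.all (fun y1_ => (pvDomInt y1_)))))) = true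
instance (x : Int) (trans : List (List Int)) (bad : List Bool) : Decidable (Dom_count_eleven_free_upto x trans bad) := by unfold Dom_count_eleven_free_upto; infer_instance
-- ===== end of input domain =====

-- B replaces A's memoized top-down recursion by bottom-up tables (per-remaining-length
-- state counts and shorter-number counts) plus one iterative walk along the digits of x.

-- ===== PORT A =====
-- shared transliteration helpers: Python's  list(map(int, str(x)))  and  trans[s][d]
-- (both sources contain these exact expressions)
def pyDigits (x : Int) : List Int :=
  (PySem.Int.toChars x).map (fun c => (PySem.Int.ofChars? [c]).getD 0)

def pyTrans (trans : List (List Int)) (s d : Int) : Int :=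
  PySem.List.pyGetD (PySem.List.pyGetD trans s []) d 0

-- the lru_cache'd dp(pos, state, started, tight); memoization does not change values,
-- the remaining digits digits[pos:] are carried as a list
def aDP (trans : List (List Int)) (bad : List Bool) :
    List Int → Int → Bool → Bool → Int
  | [], _, started, _ => if started then 1 else 0
  | dh :: dt, state, started, tight =>
    let limit : Int := if tight then dh else 9
    (PySem.List.pyRange 0 (limit + 1) 1).foldl
      (fun total dig =>
        let ntight := tight && (dig == limit)
        if !started && dig == 0 then
          total + aDP trans bad dt 0 false ntight
        else
          let nstate := pyTrans trans (if started then state else 0) dig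
          if PySem.List.pyGetD bad nstate false then total
          else total + aDP trans bad dt nstate true ntight) 0

def count_eleven_free_upto (x : Int) (trans : List (List Int)) (bad : List Bool) : Int :=
  if x ≤ 0 then 0 else aDP trans bad (pyDigits x) 0 false true

-- ===== PORT B =====
-- row of the next `free` table:  [sum(row[trans[s][d]] for d in range(10) if not bad[trans[s][d]]) for s in range(S)]
def bFreeRow (trans : List (List Int)) (bad : List Bool) (row : List Int) : List Int :=
  (List.range trans.length).map (fun (s : Nat) =>
    (PySem.List.pyRange 0 10 1).foldl
      (fun acc d =>
        let ns := pyTrans trans ((s : Int)) d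
        if PySem.List.pyGetD bad ns false then acc
        else acc + PySem.List.pyGetD row ns 0) 0)

-- sum(row[trans[0][d]] for d in range(1, 10) if not bad[trans[0][d]])
def bShortInc (trans : List (List Int)) (bad : List Bool) (row : List Int) : Int :=
  (PySem.List.pyRange 1 10 1).foldl
    (fun acc d =>
      let ns := pyTrans trans 0 d
      if PySem.List.pyGetD bad ns false then acc
      else acc + PySem.List.pyGetD row ns 0) 0

-- the table-building loop: n iterations of the body, state = (row, s_acc, free, short)
def bBuild (trans : List (List Int)) (bad : List Bool) :
    Nat → List Int × Int × List (List Int) × List Int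
  | 0 => (List.replicate trans.length 1, 0, [List.replicate trans.length 1], [0])
  | n + 1 =>
    let (row, sacc, free, short) := bBuild trans bad n
    let sacc' := sacc + bShortInc trans bad row
    let row' := bFreeRow trans bad row
    (row', sacc', free ++ [row'], short ++ [sacc'])

-- the walk over enumerate(digits); early `return total` becomes a non-recursive branch
def bWalk (trans : List (List Int)) (bad : List Bool)
    (free : List (List Int)) (short : List Int) (D : Int) :
    List Int → Int → Int → Int → Bool → Int
  | [], _pos, total, _state, started => total + (if started then 1 else 0)
  | dig :: dt, pos, total, state, started =>
    let rem : Int := D - 1 - pos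
    let total' := (PySem.List.pyRange 0 dig 1).foldl
      (fun t d =>
        if !started && d == 0 then t + PySem.List.pyGetD short rem 0
        else
          let ns := pyTrans trans (if started then state else 0) d
          if PySem.List.pyGetD bad ns false then t
          else t + PySem.List.pyGetD (PySem.List.pyGetD free rem []) ns 0) total
    if !started && dig == 0 then
      bWalk trans bad free short D dt (pos + 1) total' state started
    else
      let ns := pyTrans trans (if started then state else 0) dig
      if PySem.List.pyGetD bad ns false then total'
      else bWalk trans bad free short D dt (pos + 1) total' ns true

def count_eleven_free_upto_alt (x : Int) (trans : List (List Int)) (bad : List Bool) : Int :=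
  if x ≤ 0 then 0
  else
    let digits := pyDigits x
    let D := digits.length
    let r := bBuild trans bad (D - 1)
    bWalk trans bad r.2.2.1 r.2.2.2 (D : Int) digits 0 0 0 false

-- ===== PRECONDITION & SPEC =====
-- Pre_ restricts to well-formed automaton tables once x ≥ 1: rows of at least 10 entries
-- and transition targets that are in-range indices of trans and bad. Outside it A raises
-- IndexError (short rows, too-large targets) or reads rows through Python's
-- negative-index wraparound; B builds full 10-digit tables and needs the same shape.
def Pre_count_eleven_free_upto (x : Int) (trans : List (List Int)) (bad : List Bool) : Prop :=
  x ≤ 0 ∨ (trans ≠ [] ∧ ∀ r ∈ trans, 10 ≤ r.length ∧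
    ∀ t ∈ r, 0 ≤ t ∧ t < (trans.length : Int) ∧ t < (bad.length : Int))
instance (x : Int) (trans : List (List Int)) (bad : List Bool) : Decidable (Pre_count_eleven_free_upto x trans bad) := by unfold Pre_count_eleven_free_upto; infer_instance

def pvWitness_count_eleven_free_upto : Int × List (List Int) × List Bool :=
  (11, [[0, 1, 0, 0, 0, 0, 0, 0, 0, 0], [0, 1, 0, 0, 0, 0, 0, 0, 0, 0]], [false, false])

def Spec_count_eleven_free_upto (x : Int) (trans : List (List Int)) (bad : List Bool) (out : Int) : Prop := out = count_eleven_free_upto_alt x trans bad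
instance (x : Int) (trans : List (List Int)) (bad : List Bool) (out : Int) : Decidable (Spec_count_eleven_free_upto x trans bad out) := by unfold Spec_count_eleven_free_upto; infer_instance

-- ===== CLAIM (what is proved, stated in full; the proofs are below) =====
def Claim_equal_count_eleven_free_upto : Prop := ∀ (x : Int) (trans : List (List Int)) (bad : List Bool), Dom_count_eleven_free_upto x trans bad → Pre_count_eleven_free_upto x trans bad → Spec_count_eleven_free_upto x trans bad (count_eleven_free_upto x trans bad)

-- ===== LEMMAS AND PROOFS =====

-- well-formedness of the automaton tables (the x ≥ 1 part of Pre_)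
def TOK (trans : List (List Int)) (bad : List Bool) : Prop :=
  trans ≠ [] ∧ ∀ r ∈ trans, 10 ≤ r.length ∧
    ∀ t ∈ r, 0 ≤ t ∧ t < (trans.length : Int) ∧ t < (bad.length : Int)

-- A's dp specialized to started = true, tight = false: depends only on the length
def aU (trans : List (List Int)) (bad : List Bool) : Nat → Int → Int
  | 0, _ => 1
  | k + 1, s =>
    (PySem.List.pyRange 0 10 1).foldl
      (fun t d =>
        let ns := pyTrans trans s d
        if PySem.List.pyGetD bad ns false then t
        else t + aU trans bad k ns) 0

-- A's dp specialized to state = 0, started = false, tight = false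
def aSh (trans : List (List Int)) (bad : List Bool) : Nat → Int
  | 0 => 0
  | k + 1 =>
    (PySem.List.pyRange 1 10 1).foldl
      (fun t d =>
        let ns := pyTrans trans 0 d
        if PySem.List.pyGetD bad ns false then t
        else t + aU trans bad k ns) (aSh trans bad k)

-- the k-th `free` row as a function
def fRow (trans : List (List Int)) (bad : List Bool) : Nat → List Int
  | 0 => List.replicate trans.length 1
  | k + 1 => bFreeRow trans bad (fRow trans bad k)

theorem tok_step (trans : List (List Int)) (bad : List Bool) (h : TOK trans bad)
    (s d : Int) (hs0 : 0 ≤ s) (hs1 : s < (trans.length : Int))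
    (hd0 : 0 ≤ d) (hd1 : d < 10) :
    0 ≤ pyTrans trans s d ∧ pyTrans trans s d < (trans.length : Int) ∧
      pyTrans trans s d < (bad.length : Int) := by
  obtain ⟨-, hrows⟩ := h
  have hrow : PySem.List.pyGetD trans s [] ∈ trans :=
    PySem.List.pyGetD_mem trans [] (by unfold PySem.Raise.InRange; omega)
  obtain ⟨hlen, hmem⟩ := hrows _ hrow
  have hns : pyTrans trans s d ∈ PySem.List.pyGetD trans s [] := by
    unfold pyTrans
    exact PySem.List.pyGetD_mem _ 0 (by unfold PySem.Raise.InRange; omega)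
  exact hmem _ hns

theorem aDP_state_irrel (trans : List (List Int)) (bad : List Bool)
    (ds : List Int) (s s' : Int) (tight : Bool) :
    aDP trans bad ds s false tight = aDP trans bad ds s' false tight := by
  cases ds with
  | nil => simp [aDP]
  | cons dh dt => simp [aDP]

theorem aDP_untight_started (trans : List (List Int)) (bad : List Bool)
    (ds : List Int) (s : Int) :
    aDP trans bad ds s true false = aU trans bad ds.length s := by
  induction ds generalizing s with
  | nil => simp [aDP, aU]
  | cons dh dt ih =>
    show aDP trans bad (dh :: dt) s true false = aU trans bad (dt.length + 1) s
    rw [aDP, aU]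
    simp only [Bool.false_and, Bool.not_true]
    apply PySem.List.foldl_congr_mem
    intro acc d _
    simp [ih]

theorem aDP_untight_unstarted (trans : List (List Int)) (bad : List Bool)
    (ds : List Int) (s : Int) :
    aDP trans bad ds s false false = aSh trans bad ds.length := by
  induction ds generalizing s with
  | nil => simp [aDP, aSh]
  | cons dh dt ih =>
    show aDP trans bad (dh :: dt) s false false = aSh trans bad (dt.length + 1)
    rw [aDP, aSh]
    simp only [Bool.false_eq_true, if_false, Bool.false_and, Bool.not_false, Bool.true_and]
    have hsplit : PySem.List.pyRange 0 (9 + 1) 1 = 0 :: PySem.List.pyRange 1 10 1 := by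
      rw [PySem.List.pyRange_one_cons (by norm_num)]; norm_num
    rw [hsplit, List.foldl_cons]
    have h0 : ((0:Int) == 0) = true := rfl
    simp only [h0, if_true, ih, zero_add]
    apply PySem.List.foldl_congr_mem
    intro acc d hd
    rw [PySem.List.mem_pyRange_one] at hd
    have hne : (d == (0:Int)) = false := by simp; omega
    simp only [hne, Bool.false_eq_true, if_false, aDP_untight_started]

theorem fRow_lookup (trans : List (List Int)) (bad : List Bool) (h : TOK trans bad)
    (k : Nat) (s : Int) (hs0 : 0 ≤ s) (hs1 : s < (trans.length : Int)) :
    PySem.List.pyGetD (fRow trans bad k) s 0 = aU trans bad k s := by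
  induction k generalizing s with
  | zero =>
    rw [fRow, aU, PySem.List.pyGetD_eq_getElem _ _ hs0 (by simpa using hs1)]
    simp
  | succ k ih =>
    rw [fRow, aU, bFreeRow]
    have hlt : s.toNat < trans.length := by omega
    rw [PySem.List.pyGetD_eq_getElem _ _ hs0 (by simpa using hs1)]
    rw [List.getElem_map, List.getElem_range]
    rw [Int.toNat_of_nonneg hs0]
    apply PySem.List.foldl_congr_mem
    intro acc d hd
    rw [PySem.List.mem_pyRange_one] at hd
    obtain ⟨hns0, hns1, hns2⟩ := tok_step trans bad h s d hs0 hs1 hd.1 hd.2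
    simp only [ih _ hns0 hns1]

theorem foldl_addlike {α : Type} (l : List α) (f : Int → α → Int) (g : α → Int)
    (hf : ∀ (t : Int), ∀ d ∈ l, f t d = t + g d) (a : Int) :
    l.foldl f a = a + (l.map g).sum := by
  rw [PySem.List.foldl_congr_mem l f (fun t d => t + g d) a hf, PySem.List.foldl_add]

theorem bBuild_eq (trans : List (List Int)) (bad : List Bool) (h : TOK trans bad) (n : Nat) :
    bBuild trans bad n =
      (fRow trans bad n, aSh trans bad n,
        (List.range (n + 1)).map (fRow trans bad),
        (List.range (n + 1)).map (aSh trans bad)) := by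
  have hS : 0 < trans.length := List.length_pos_iff.mpr h.1
  induction n with
  | zero => simp [bBuild, fRow, aSh]
  | succ n ih =>
    rw [bBuild, ih]
    have hstep : aSh trans bad (n + 1) = aSh trans bad n + bShortInc trans bad (fRow trans bad n) := by
      rw [aSh, bShortInc]
      rw [foldl_addlike _ _ (fun d => if PySem.List.pyGetD bad (pyTrans trans 0 d) false then 0
            else aU trans bad n (pyTrans trans 0 d)) ?h1,
          foldl_addlike _ _ (fun d => if PySem.List.pyGetD bad (pyTrans trans 0 d) false then 0
            else PySem.List.pyGetD (fRow trans bad n) (pyTrans trans 0 d) 0) ?h2]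
      case h1 => intro t d _; dsimp only; split <;> simp
      case h2 => intro t d _; dsimp only; split <;> simp
      rw [zero_add]
      congr 1
      refine congrArg List.sum ?_
      apply List.map_congr_left
      intro d hd
      rw [PySem.List.mem_pyRange_one] at hd
      obtain ⟨hns0, hns1, -⟩ := tok_step trans bad h 0 d (le_refl 0) (by exact_mod_cast hS) (by omega) (by omega)
      rw [fRow_lookup trans bad h n _ hns0 hns1]
    rw [List.range_succ (n := n + 1), List.map_append, List.map_append]
    rw [fRow, hstep]
    simp
    exact ⟨rfl, hstep.symm⟩

theorem bWalk_eq (trans : List (List Int)) (bad : List Bool) (h : TOK trans bad) (D : Nat)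
    (ds : List Int) (pos : Nat) (total s : Int) (started : Bool)
    (hlen : pos + ds.length = D)
    (hdig : ∀ d ∈ ds, 0 ≤ d ∧ d ≤ 9)
    (hs : started = true → 0 ≤ s ∧ s < (trans.length : Int)) :
    bWalk trans bad ((List.range D).map (fRow trans bad))
        ((List.range D).map (aSh trans bad)) (D : Int) ds (pos : Int) total s started =
      total + aDP trans bad ds s started true := by
  induction ds generalizing pos total s started with
  | nil => simp [bWalk, aDP]
  | cons dig dt ih =>
    have hS : 0 < trans.length := List.length_pos_iff.mpr h.1
    obtain ⟨⟨hd0, hd9⟩, hdt⟩ : (0 ≤ dig ∧ dig ≤ 9) ∧ ∀ d ∈ dt, 0 ≤ d ∧ d ≤ 9 := by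
      constructor
      · exact hdig dig List.mem_cons_self
      · intro d hd; exact hdig d (List.mem_cons_of_mem _ hd)
    have hk : pos + dt.length + 1 = D := by simpa [Nat.add_comm, Nat.add_assoc] using hlen
    have hkD : dt.length < D := by omega
    have hrem : (D : Int) - 1 - (pos : Int) = (dt.length : Int) := by omega
    -- the per-digit contribution of an untight continuation
    set g : Int → Int := fun d =>
      if !started && d == 0 then aSh trans bad dt.length
      else
        if PySem.List.pyGetD bad (pyTrans trans (if started then s else 0) d) false then 0
        else aU trans bad dt.length (pyTrans trans (if started then s else 0) d) with hg
    have hstate : 0 ≤ (if started then s else 0) ∧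
        (if started then s else 0) < (trans.length : Int) := by
      cases started with
      | false => simpa using hS
      | true => simpa using hs rfl
    rw [bWalk, aDP]
    dsimp only
    simp only [if_true]
    rw [hrem]
    -- B's prefix loop
    rw [foldl_addlike _ _ g ?hB]
    case hB =>
      intro t d hd
      rw [PySem.List.mem_pyRange_one] at hd
      dsimp only
      have hfree : PySem.List.pyGetD (List.map (fRow trans bad) (List.range D))
          ((dt.length : Int)) [] = fRow trans bad dt.length := by
        rw [show ((dt.length : Int)) = ((dt.length : Nat) : Int) from rfl,
          PySem.List.pyGetD_natCast, PySem.List.getD_map_range _ _ _ _ hkD]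
      have hshort : PySem.List.pyGetD (List.map (aSh trans bad) (List.range D))
          ((dt.length : Int)) 0 = aSh trans bad dt.length := by
        rw [show ((dt.length : Int)) = ((dt.length : Nat) : Int) from rfl,
          PySem.List.pyGetD_natCast, PySem.List.getD_map_range _ _ _ _ hkD]
      rw [hfree, hshort]
      by_cases hc : (!started && d == (0:Int)) = true
      · simp only [hg]
        rw [if_pos hc, if_pos hc]
      · simp only [hg]
        rw [if_neg hc, if_neg hc]
        obtain ⟨hns0, hns1, -⟩ := tok_step trans bad h _ d hstate.1 hstate.2 hd.1 (by omega)
        rw [fRow_lookup trans bad h _ _ hns0 hns1]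
        by_cases hb : PySem.List.pyGetD bad
            (pyTrans trans (if started = true then s else 0) d) false = true
        · rw [if_pos hb, if_pos hb]; omega
        · rw [if_neg hb, if_neg hb]
    -- A's loop: split off the final tight digit
    have hsplit : PySem.List.pyRange 0 (dig + 1) 1 =
        PySem.List.pyRange 0 dig 1 ++ [dig] := by
      exact PySem.List.pyRange_one_succ_right hd0
    rw [hsplit, List.foldl_append]
    rw [foldl_addlike (PySem.List.pyRange 0 dig 1) _ g ?hA]
    case hA =>
      intro t d hd
      rw [PySem.List.mem_pyRange_one] at hd
      have hne : (d == dig) = false := by simp; omega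
      simp only [hne, Bool.and_false]
      simp only [hg]
      by_cases hc : (!started && d == (0:Int)) = true
      · rw [if_pos hc, if_pos hc, aDP_untight_unstarted]
      · rw [if_neg hc, if_neg hc]
        by_cases hb : PySem.List.pyGetD bad
            (pyTrans trans (if started = true then s else 0) d) false = true
        · rw [if_pos hb, if_pos hb]; omega
        · rw [if_neg hb, if_neg hb, aDP_untight_started]
    simp only [List.foldl_cons, List.foldl_nil, zero_add]
    simp only [beq_self_eq_true, Bool.and_true]
    by_cases hc : (!started && dig == (0:Int)) = true
    · rw [if_pos hc, if_pos hc]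
      have hstart : started = false := by revert hc; cases started <;> simp
      subst hstart
      have ih' := ih (pos + 1) (total + (List.map g (PySem.List.pyRange 0 dig 1)).sum) s false
        (by omega) hdt (by simp)
      push_cast at ih'
      rw [ih', aDP_state_irrel trans bad dt s 0]
      ring
    · rw [if_neg hc, if_neg hc]
      by_cases hb : PySem.List.pyGetD bad
          (pyTrans trans (if started = true then s else 0) dig) false = true
      · rw [if_pos hb, if_pos hb]
      · rw [if_neg hb, if_neg hb]
        obtain ⟨hns0, hns1, -⟩ := tok_step trans bad h _ dig hstate.1 hstate.2 hd0 (by omega)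
        have ih' := ih (pos + 1) (total + (List.map g (PySem.List.pyRange 0 dig 1)).sum)
          (pyTrans trans (if started = true then s else 0) dig) true
          (by omega) hdt (fun _ => ⟨hns0, hns1⟩)
        push_cast at ih'
        rw [ih']
        ring

theorem digit_char_mem (c : Char) (h : c.isDigit) :
    c ∈ ['0', '1', '2', '3', '4', '5', '6', '7', '8', '9'] := by
  simp [Char.isDigit] at h
  obtain ⟨h1, h2⟩ := h
  have h1' : 48 ≤ c.val.toNat := by exact_mod_cast UInt32.le_iff_toNat_le.mp h1
  have h2' : c.val.toNat ≤ 57 := by exact_mod_cast UInt32.le_iff_toNat_le.mp h2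
  have heq : ∀ (d : Char), d.val.toNat = c.val.toNat → d = c := by
    intro d hd; exact Char.ext (UInt32.toNat_inj.mp hd)
  interval_cases hc : c.val.toNat <;>
    first
      | (rw [← heq '0' (by decide)]; decide) | (rw [← heq '1' (by decide)]; decide)
      | (rw [← heq '2' (by decide)]; decide) | (rw [← heq '3' (by decide)]; decide)
      | (rw [← heq '4' (by decide)]; decide) | (rw [← heq '5' (by decide)]; decide)
      | (rw [← heq '6' (by decide)]; decide) | (rw [← heq '7' (by decide)]; decide)
      | (rw [← heq '8' (by decide)]; decide) | (rw [← heq '9' (by decide)]; decide)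

theorem digit_char_val (c : Char) (h : c.isDigit) :
    0 ≤ (PySem.Int.ofChars? [c]).getD 0 ∧ (PySem.Int.ofChars? [c]).getD 0 ≤ 9 := by
  have hm := digit_char_mem c h
  fin_cases hm <;> decide

theorem pyDigits_bounds (x : Int) (hx : 1 ≤ x) :
    ∀ d ∈ pyDigits x, 0 ≤ d ∧ d ≤ 9 := by
  intro d hd
  rw [pyDigits, List.mem_map] at hd
  obtain ⟨c, hc, rfl⟩ := hd
  rw [PySem.Int.toChars, if_neg (by omega)] at hc
  exact digit_char_val c (Nat.isDigit_of_mem_toDigits (by norm_num) (by norm_num) hc)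

theorem pyDigits_ne_nil (x : Int) (hx : 1 ≤ x) : pyDigits x ≠ [] := by
  rw [pyDigits, PySem.Int.toChars, if_neg (by omega)]
  have := @Nat.length_toDigits_pos 10 x.toNat
  intro hnil
  rw [List.map_eq_nil_iff] at hnil
  simp [hnil] at this

-- ===== VERDICT (by name: the statement is the Claim_ definition above) =====
theorem count_eleven_free_upto_spec : Claim_equal_count_eleven_free_upto := by
  intro x trans bad _ hpre
  unfold Spec_count_eleven_free_upto
  by_cases hx : x ≤ 0
  · simp [count_eleven_free_upto, count_eleven_free_upto_alt, hx]
  · have hx1 : 1 ≤ x := by omega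
    have htok : TOK trans bad := by
      rcases hpre with h0 | hok
      · omega
      · exact hok
    rw [count_eleven_free_upto, count_eleven_free_upto_alt, if_neg hx, if_neg hx]
    dsimp only
    rw [bBuild_eq trans bad htok ((pyDigits x).length - 1)]
    have hD1 : 1 ≤ (pyDigits x).length :=
      List.length_pos_iff.mpr (pyDigits_ne_nil x hx1)
    rw [show (pyDigits x).length - 1 + 1 = (pyDigits x).length from by omega]
    have hw := bWalk_eq trans bad htok (pyDigits x).length (pyDigits x) 0 0 0 false
      (by simp) (pyDigits_bounds x hx1) (by simp)
    simpa using hw.symm
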